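-- pv_equiv track=rewrite | github.com/click-gz/desktop-pet | backend-python/services/behavior_analyzer.py | _infer_time_pattern
-- ===== SOURCE A (Python) =====
-- from typing import Dict, List, Optional, Tuple
--
-- def _infer_time_pattern(hours: List[int]) -> str:
--     """推断时间使用模式"""
--     if not hours:
--         return "未知"
--
--     morning_count = sum(1 for h in hours if 6 <= h < 12)
--     afternoon_count = sum(1 for h in hours if 12 <= h < 18)
--     evening_count = sum(1 for h in hours if 18 <= h < 24)
--     night_count = sum(1 for h in hours if 0 <= h < 6)
--
--     total = len(hours)
--
--     if evening_count / total > 0.4: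
--         return "夜猫子型"
--     elif morning_count / total > 0.4:
--         return "早起型"
--     elif afternoon_count / total > 0.4:
--         return "白天型"
--     elif night_count / total > 0.3:
--         return "深夜型"
--     else:
--         return "全天分散型"
-- ===== SOURCE B (Python) =====
-- def _bisect_left(a, x):
--     lo, hi = 0, len(a)
--     while lo < hi:
--         mid = (lo + hi) // 2
--         if a[mid] < x:
--             lo = mid + 1
--         else:
--             hi = mid
--     return lo
--
--
-- def _infer_time_pattern(hours):
--     if not hours:
--         return "未知"
--
--     s = sorted(hours)
--     i0 = _bisect_left(s, 0)
--     i6 = _bisect_left(s, 6)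
--     i12 = _bisect_left(s, 12)
--     i18 = _bisect_left(s, 18)
--     i24 = _bisect_left(s, 24)
--
--     night = i6 - i0
--     morning = i12 - i6
--     afternoon = i18 - i12
--     evening = i24 - i18
--
--     total = len(hours)
--
--     if evening / total > 0.4:
--         return "夜猫子型"
--     elif morning / total > 0.4:
--         return "早起型"
--     elif afternoon / total > 0.4:
--         return "白天型"
--     elif night / total > 0.3:
--         return "深夜型"
--     else:
--         return "全天分散型"
-- ===== Notes on version B (the rewrite author's own statement) =====
-- stated objective: alternative
-- what changed: Replaces A's four filter-and-sum scans with a sort-then-binary-search algorithm: sort the hours once, locate the boundaries 0, 6, 12, 18, 24 with a hand-written bisect_left, and obtain each period count as a difference of boundary indices; the same threshold chain then decides the label.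
import Mathlib
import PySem

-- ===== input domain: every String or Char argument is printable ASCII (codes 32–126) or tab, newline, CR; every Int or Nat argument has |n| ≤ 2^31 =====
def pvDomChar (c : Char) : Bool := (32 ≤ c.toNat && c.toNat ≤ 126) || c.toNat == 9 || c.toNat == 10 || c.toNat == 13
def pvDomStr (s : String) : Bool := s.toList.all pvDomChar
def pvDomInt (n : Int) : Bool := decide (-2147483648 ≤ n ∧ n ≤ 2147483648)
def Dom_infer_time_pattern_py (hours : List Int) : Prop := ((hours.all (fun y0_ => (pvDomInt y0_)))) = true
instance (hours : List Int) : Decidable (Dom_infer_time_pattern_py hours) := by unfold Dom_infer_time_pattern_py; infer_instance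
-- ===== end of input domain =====

-- B replaces A's four filter-and-sum scans by sorting the hours once and locating the
-- period boundaries (0, 6, 12, 18, 24) with a hand-written binary search, each period
-- count being a difference of boundary indices; alternative algorithm (O(n log n)).


-- ===== PORT A =====
-- 'count / total > 0.4' (resp. '> 0.3') is ported as the integer comparison 5*count > 2*total
-- (resp. 10*count > 3*total): exact, since the rational gap to the threshold (≥ 1/(5·total))
-- dwarfs float-division rounding for any list in the domain.
def infer_time_pattern_py (hours : List Int) : String :=
  if hours = [] then "未知"
  else
    let morning_count : Int := ((hours.countP (fun h => decide (6 ≤ h ∧ h < 12)) : Nat) : Int)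
    let afternoon_count : Int := ((hours.countP (fun h => decide (12 ≤ h ∧ h < 18)) : Nat) : Int)
    let evening_count : Int := ((hours.countP (fun h => decide (18 ≤ h ∧ h < 24)) : Nat) : Int)
    let night_count : Int := ((hours.countP (fun h => decide (0 ≤ h ∧ h < 6)) : Nat) : Int)
    let total : Int := ((hours.length : Nat) : Int)
    if 5 * evening_count > 2 * total then "夜猫子型"
    else if 5 * morning_count > 2 * total then "早起型"
    else if 5 * afternoon_count > 2 * total then "白天型"
    else if 10 * night_count > 3 * total then "深夜型"
    else "全天分散型"

-- ===== PORT B =====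
-- the hand-written _bisect_left loop from Source B; a[mid] is read with getD 0 — the index
-- is always in range under the loop's invariant lo < hi ≤ len(a), so this is exact.
def pvBisectLoop (a : List Int) (x : Int) (lo hi : Nat) : Nat :=
  if lo < hi then
    let mid := (lo + hi) / 2
    if a.getD mid 0 < x then pvBisectLoop a x (mid + 1) hi
    else pvBisectLoop a x lo mid
  else lo
termination_by hi - lo
decreasing_by all_goals omega

def pvBisect (a : List Int) (x : Int) : Nat := pvBisectLoop a x 0 a.length

-- same float thresholds as in A, ported as the same exact integer comparisons.
def infer_time_pattern_py_alt (hours : List Int) : String :=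
  if hours = [] then "未知"
  else
    let s := PySem.List.sorted hours (fun x => x) false
    let i0 := pvBisect s 0
    let i6 := pvBisect s 6
    let i12 := pvBisect s 12
    let i18 := pvBisect s 18
    let i24 := pvBisect s 24
    let night : Int := ((i6 - i0 : Nat) : Int)
    let morning : Int := ((i12 - i6 : Nat) : Int)
    let afternoon : Int := ((i18 - i12 : Nat) : Int)
    let evening : Int := ((i24 - i18 : Nat) : Int)
    let total : Int := ((hours.length : Nat) : Int)
    if 5 * evening > 2 * total then "夜猫子型"
    else if 5 * morning > 2 * total then "早起型"
    else if 5 * afternoon > 2 * total then "白天型"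
    else if 10 * night > 3 * total then "深夜型"
    else "全天分散型"

-- ===== PRECONDITION & SPEC =====
def Spec_infer_time_pattern_py (hours : List Int) (out : String) : Prop := out = infer_time_pattern_py_alt hours
instance (hours : List Int) (out : String) : Decidable (Spec_infer_time_pattern_py hours out) := by unfold Spec_infer_time_pattern_py; infer_instance

-- ===== CLAIM =====
def Claim_equal_infer_time_pattern_py : Prop := ∀ (hours : List Int), Dom_infer_time_pattern_py hours → Spec_infer_time_pattern_py hours (infer_time_pattern_py hours)

-- ===== LEMMAS AND PROOFS =====

-- if the first lo elements of a are < x and the rest are ≥ x, then countP (< x) a = lo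
theorem pv_countP_prefix (x : Int) : ∀ (a : List Int) (lo : Nat), lo ≤ a.length →
    (∀ j (hj : j < a.length), j < lo → a[j] < x) →
    (∀ j (hj : j < a.length), lo ≤ j → x ≤ a[j]) →
    a.countP (fun h => decide (h < x)) = lo := by
  intro a
  induction a with
  | nil => intro lo h _ _; simp at h ⊢; omega
  | cons y t ih =>
    intro lo hlen h1 h2
    cases lo with
    | zero =>
      rw [List.countP_eq_zero]
      intro h hm
      obtain ⟨j, hj, rfl⟩ := List.mem_iff_getElem.1 hm
      have := h2 j hj (Nat.zero_le _)
      simpa using by omega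
    | succ l =>
      have hy : y < x := by simpa using h1 0 (by simp) (by omega)
      rw [List.countP_cons]
      have ht : t.countP (fun h => decide (h < x)) = l := by
        apply ih l (by simpa using hlen)
        · intro j hj hl
          have := h1 (j + 1) (by simpa using Nat.succ_lt_succ hj) (by omega)
          simpa using this
        · intro j hj hl
          have := h2 (j + 1) (by simpa using Nat.succ_lt_succ hj) (by omega)
          simpa using this
      simp [ht, hy]

-- correctness of the binary-search loop on a sorted list
theorem pvBisectLoop_eq (a : List Int) (x : Int) (hsort : a.Pairwise (· ≤ ·)) :
    ∀ (lo hi : Nat), hi ≤ a.length → lo ≤ hi →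
    (∀ j (hj : j < a.length), j < lo → a[j] < x) →
    (∀ j (hj : j < a.length), hi ≤ j → x ≤ a[j]) →
    pvBisectLoop a x lo hi = a.countP (fun h => decide (h < x)) := by
  have hmono : ∀ i j (hi : i < a.length) (hj : j < a.length), i ≤ j → a[i] ≤ a[j] := by
    intro i j hi hj hij
    rcases Nat.lt_or_ge i j with h | h
    · exact (List.pairwise_iff_getElem.1 hsort) i j hi hj h
    · have : i = j := by omega
      subst this; exact le_refl _
  intro lo hi
  induction lo, hi using pvBisectLoop.induct a x with
  | case1 lo hi hlt mid hmid ih =>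
    intro hhi hlohi h1 h2
    have hmlt : mid < a.length := by omega
    have hget : a.getD mid 0 = a[mid] := by
      simp [List.getD_eq_getElem?_getD, List.getElem?_eq_getElem hmlt]
    rw [pvBisectLoop]
    simp only [hlt, if_true]
    rw [hget] at hmid ⊢
    simp only [hmid, if_true]
    apply ih hhi (by omega)
    · intro j hj hjm
      have : a[j] ≤ a[mid] := hmono j mid hj hmlt (by omega)
      omega
    · exact h2
  | case2 lo hi hlt mid hmid ih =>
    intro hhi hlohi h1 h2
    have hmlt : mid < a.length := by omega
    have hget : a.getD mid 0 = a[mid] := by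
      simp [List.getD_eq_getElem?_getD, List.getElem?_eq_getElem hmlt]
    rw [pvBisectLoop]
    simp only [hlt, if_true]
    rw [hget] at hmid ⊢
    simp only [hmid, if_false]
    apply ih (by omega) (by omega) h1
    · intro j hj hjm
      have : a[mid] ≤ a[j] := hmono mid j hmlt hj hjm
      omega
  | case3 lo hi hlt =>
    intro hhi hlohi h1 h2
    rw [pvBisectLoop]
    simp only [hlt, if_false]
    have hle : lo = hi := by omega
    subst hle
    exact (pv_countP_prefix x a lo (by omega) h1 h2).symm

-- pvBisect on sorted(hours) counts the hours below x
theorem pvBisect_sorted (hours : List Int) (x : Int) :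
    pvBisect (PySem.List.sorted hours (fun y => y) false) x
      = hours.countP (fun h => decide (h < x)) := by
  set s := PySem.List.sorted hours (fun y => y) false with hs
  have hperm : s.Perm hours := PySem.List.sorted_perm hours (fun y => y) false
  have hsort : s.Pairwise (· ≤ ·) := PySem.List.sorted_pairwise hours (fun y => y)
  rw [pvBisect, pvBisectLoop_eq s x hsort 0 s.length (le_refl _) (Nat.zero_le _)
        (by intro j hj h; omega) (by intro j hj h; omega)]
  exact hperm.countP_eq _

-- counting h < b splits at a ≤ b into h < a and a ≤ h < b
theorem pv_countP_split (xs : List Int) (a b : Int) (hab : a ≤ b) :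
    xs.countP (fun h => decide (h < b))
      = xs.countP (fun h => decide (h < a)) + xs.countP (fun h => decide (a ≤ h ∧ h < b)) := by
  induction xs with
  | nil => simp
  | cons y t ih =>
    simp only [List.countP_cons, ih, decide_eq_true_eq]
    split_ifs <;> omega

-- ===== VERDICT =====
theorem infer_time_pattern_py_spec : Claim_equal_infer_time_pattern_py := by
  intro hours _
  unfold Spec_infer_time_pattern_py infer_time_pattern_py infer_time_pattern_py_alt
  by_cases hnil : hours = []
  · simp [hnil]
  · simp only [hnil, if_false]
    rw [pvBisect_sorted, pvBisect_sorted, pvBisect_sorted, pvBisect_sorted, pvBisect_sorted]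
    have e1 : hours.countP (fun h => decide (h < 6)) - hours.countP (fun h => decide (h < 0))
        = hours.countP (fun h => decide (0 ≤ h ∧ h < 6)) := by
      rw [pv_countP_split hours 0 6 (by omega)]; omega
    have e2 : hours.countP (fun h => decide (h < 12)) - hours.countP (fun h => decide (h < 6))
        = hours.countP (fun h => decide (6 ≤ h ∧ h < 12)) := by
      rw [pv_countP_split hours 6 12 (by omega)]; omega
    have e3 : hours.countP (fun h => decide (h < 18)) - hours.countP (fun h => decide (h < 12))
        = hours.countP (fun h => decide (12 ≤ h ∧ h < 18)) := by
      rw [pv_countP_split hours 12 18 (by omega)]; omega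
    have e4 : hours.countP (fun h => decide (h < 24)) - hours.countP (fun h => decide (h < 18))
        = hours.countP (fun h => decide (18 ≤ h ∧ h < 24)) := by
      rw [pv_countP_split hours 18 24 (by omega)]; omega
    rw [e1, e2, e3, e4]
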